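-- pv_equiv track=rewrite | github.com/davidvictor/mind | core/scripts/common/stance.py | _bullet_blocks
-- ===== SOURCE A (Python) =====
-- def _bullet_blocks(content: str) -> list[str]:
--     blocks: list[str] = []
--     current: list[str] = []
--     for raw_line in content.splitlines():
--         stripped = raw_line.strip()
--         if stripped.startswith("- "):
--             if current:
--                 blocks.append("\n".join(current).strip())
--             current = [stripped]
--             continue
--         if current:
--             if stripped:
--                 current.append(stripped)
--             else:
--                 current.append("")
--     if current:
--         blocks.append("\n".join(current).strip())
--     return [block for block in blocks if block]
-- ===== SOURCE B (Python) =====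
-- def _bullet_blocks(content: str) -> list[str]:
--     # Back-to-front single pass: close a segment whenever a bullet line is met;
--     # lines before the first bullet never get closed and are dropped for free.
--     blocks: list[str] = []
--     seg: list[str] = []
--     for raw_line in reversed(content.splitlines()):
--         stripped = raw_line.strip()
--         seg.append(stripped)
--         if stripped.startswith("- "):
--             blocks.append("\n".join(reversed(seg)).strip())
--             seg = []
--     blocks.reverse()
--     return [block for block in blocks if block]
-- ===== Notes on version B (the rewrite author's own statement) =====
-- stated objective: alternative
-- what changed: Replaces the forward flush-on-bullet accumulator (with an 'if current' guard and a final flush) by a single back-to-front pass that closes a segment exactly when a bullet line is met, dropping pre-bullet lines for free.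
import Mathlib
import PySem

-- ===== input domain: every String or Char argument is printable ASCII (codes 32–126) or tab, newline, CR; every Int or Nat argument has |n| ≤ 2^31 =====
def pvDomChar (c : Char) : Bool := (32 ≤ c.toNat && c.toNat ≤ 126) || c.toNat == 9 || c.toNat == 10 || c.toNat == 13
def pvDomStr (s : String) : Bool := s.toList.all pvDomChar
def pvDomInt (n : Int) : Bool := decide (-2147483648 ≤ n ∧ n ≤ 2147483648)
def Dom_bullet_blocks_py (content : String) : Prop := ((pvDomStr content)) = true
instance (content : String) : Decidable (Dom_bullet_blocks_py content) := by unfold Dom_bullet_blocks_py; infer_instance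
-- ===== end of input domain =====

-- B replaces A's forward flush-on-bullet accumulator by a back-to-front pass that
-- closes a segment exactly at each bullet line (alternative decomposition, same cost).

-- ===== PORT A =====
def bullet_blocks_py (content : String) : List String :=
  let r := (PySem.Str.splitlines content).foldl
    (fun (st : List String × List String) raw_line =>
      let stripped := PySem.Str.strip raw_line
      if PySem.Str.startswith stripped "- " then
        (if st.2 ≠ [] then st.1 ++ [PySem.Str.strip (PySem.Str.join "\n" st.2)] else st.1,
         [stripped])
      else if st.2 ≠ [] then
        (st.1, if stripped ≠ "" then st.2 ++ [stripped] else st.2 ++ [""])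
      else st) ([], [])
  let blocks := if r.2 ≠ [] then r.1 ++ [PySem.Str.strip (PySem.Str.join "\n" r.2)] else r.1
  blocks.filter (fun block => block ≠ "")

-- ===== PORT B =====
def bullet_blocks_py_alt (content : String) : List String :=
  let r := (PySem.Str.splitlines content).foldr
    (fun raw_line (st : List String × List String) =>
      let stripped := PySem.Str.strip raw_line
      let seg := st.2 ++ [stripped]
      if PySem.Str.startswith stripped "- " then
        (st.1 ++ [PySem.Str.strip (PySem.Str.join "\n" seg.reverse)], [])
      else (st.1, seg)) ([], [])
  r.1.reverse.filter (fun block => block ≠ "")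

-- ===== PRECONDITION & SPEC =====
def Spec_bullet_blocks_py (content : String) (out : List String) : Prop := out = bullet_blocks_py_alt content
instance (content : String) (out : List String) : Decidable (Spec_bullet_blocks_py content out) := by unfold Spec_bullet_blocks_py; infer_instance

-- ===== CLAIM (what is proved, stated in full; the proofs are below) =====
def Claim_equal_bullet_blocks_py : Prop := ∀ (content : String), Dom_bullet_blocks_py content → Spec_bullet_blocks_py content (bullet_blocks_py content)

-- ===== LEMMAS AND PROOFS =====

def pvBullet (s : String) : Bool := PySem.Str.startswith s "- "

def pvFlush (cur : List String) : List String :=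
  if cur ≠ [] then [PySem.Str.strip (PySem.Str.join "\n" cur)] else []

-- A's loop, strip-free, with the block list factored out
def pvStepA (st : List String × List String) (l : String) : List String × List String :=
  if pvBullet l then (st.1 ++ pvFlush st.2, [l])
  else if st.2 ≠ [] then (st.1, st.2 ++ [l]) else st

def pvG : List String → List String → List String
  | [], cur => pvFlush cur
  | l :: ls, cur =>
      if pvBullet l then pvFlush cur ++ pvG ls [l]
      else pvG ls (if cur ≠ [] then cur ++ [l] else cur)

-- B's loop, strip-free
def pvStepB (l : String) (st : List String × List String) : List String × List String :=
  if pvBullet l then (st.1 ++ [PySem.Str.strip (PySem.Str.join "\n" (st.2 ++ [l]).reverse)], [])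
  else (st.1, st.2 ++ [l])

def pvH : List String → List String
  | [] => []
  | l :: ls =>
      if pvBullet l then
        PySem.Str.strip (PySem.Str.join "\n" (l :: ls.takeWhile (fun x => !pvBullet x))) :: pvH ls
      else pvH ls

lemma pvFoldB (m : List String) :
    m.foldr pvStepB ([], []) = ((pvH m).reverse, (m.takeWhile (fun l => !pvBullet l)).reverse) := by
  induction m with
  | nil => simp [pvH]
  | cons l ls ih =>
      by_cases hb : pvBullet l
      · simp [pvStepB, pvH, ih, hb]
      · simp [pvStepB, pvH, ih, hb]

lemma pvFoldA (m : List String) (blocks cur : List String) :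
    (if (m.foldl pvStepA (blocks, cur)).2 ≠ [] then
        (m.foldl pvStepA (blocks, cur)).1 ++
          [PySem.Str.strip (PySem.Str.join "\n" (m.foldl pvStepA (blocks, cur)).2)]
      else (m.foldl pvStepA (blocks, cur)).1) = blocks ++ pvG m cur := by
  induction m generalizing blocks cur with
  | nil => simp [pvG, pvFlush]; split_ifs <;> simp_all
  | cons l ls ih =>
      by_cases hb : pvBullet l
      · simp only [List.foldl_cons, pvStepA, hb, if_true, pvG, ih, List.append_assoc]
      · by_cases hc : cur = []
        · simp [pvStepA, hb, hc, pvG, ih]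
        · simp [pvStepA, hb, hc, pvG, ih]

lemma pvKey (m : List String) (cur : List String) (h : cur ≠ []) :
    pvG m cur =
      PySem.Str.strip (PySem.Str.join "\n" (cur ++ m.takeWhile (fun x => !pvBullet x))) :: pvH m := by
  induction m generalizing cur with
  | nil => simp [pvG, pvFlush, h, pvH]
  | cons l ls ih =>
      by_cases hb : pvBullet l
      · simp [pvG, hb, pvFlush, h, pvH, ih [l] (by simp)]
      · simp [pvG, hb, h, pvH, ih (cur ++ [l]) (by simp)]

lemma pvGH (m : List String) : pvG m [] = pvH m := by
  induction m with
  | nil => simp [pvG, pvFlush, pvH]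
  | cons l ls ih =>
      by_cases hb : pvBullet l
      · simp [pvG, hb, pvFlush, pvH, pvKey ls [l] (by simp)]
      · simp [pvG, hb, pvH, ih]

-- the ports' step functions are the strip-free steps applied to the stripped line
lemma pvStepA_eq (st : List String × List String) (raw : String) :
    (let stripped := PySem.Str.strip raw
     if PySem.Str.startswith stripped "- " then
       (if st.2 ≠ [] then st.1 ++ [PySem.Str.strip (PySem.Str.join "\n" st.2)] else st.1, [stripped])
     else if st.2 ≠ [] then
       (st.1, if stripped ≠ "" then st.2 ++ [stripped] else st.2 ++ [""])
     else st) = pvStepA st (PySem.Str.strip raw) := by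
  simp only [pvStepA, pvBullet, pvFlush]
  split_ifs <;> simp_all

-- ===== VERDICT (by name: the statement is the Claim_ definition above) =====
theorem bullet_blocks_py_spec : Claim_equal_bullet_blocks_py := by
  intro content _
  unfold Spec_bullet_blocks_py bullet_blocks_py bullet_blocks_py_alt
  simp only
  have hA :
      (PySem.Str.splitlines content).foldl
        (fun (st : List String × List String) raw_line =>
          let stripped := PySem.Str.strip raw_line
          if PySem.Str.startswith stripped "- " then
            (if st.2 ≠ [] then st.1 ++ [PySem.Str.strip (PySem.Str.join "\n" st.2)] else st.1,
             [stripped])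
          else if st.2 ≠ [] then
            (st.1, if stripped ≠ "" then st.2 ++ [stripped] else st.2 ++ [""])
          else st) ([], []) =
      ((PySem.Str.splitlines content).map PySem.Str.strip).foldl pvStepA ([], []) := by
    rw [List.foldl_map]
    apply PySem.List.foldl_congr_mem
    intro st raw _
    exact pvStepA_eq st raw
  have hB :
      (PySem.Str.splitlines content).foldr
        (fun raw_line (st : List String × List String) =>
          let stripped := PySem.Str.strip raw_line
          let seg := st.2 ++ [stripped]
          if PySem.Str.startswith stripped "- " then
            (st.1 ++ [PySem.Str.strip (PySem.Str.join "\n" seg.reverse)], [])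
          else (st.1, seg)) ([], []) =
      ((PySem.Str.splitlines content).map PySem.Str.strip).foldr pvStepB ([], []) := by
    rw [List.foldr_map]
    rfl
  rw [hA, hB, pvFoldB]
  set m := (PySem.Str.splitlines content).map PySem.Str.strip with hm
  have := pvFoldA m [] []
  simp only [List.nil_append] at this
  rw [this, pvGH, List.reverse_reverse]
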